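-- pv_equiv track=rewrite | github.com/Huxhh/LeetCodePy | WeeklyMatch/189.py | peopleIndexes
-- ===== SOURCE A (Python) =====
-- def peopleIndexes(favoriteCompanies):
--     favoriteCompanies = [sorted(x) for x in favoriteCompanies]
--
--     res = []
--     for i in range(len(favoriteCompanies)):
--         ff = True
--         for j in range(len(favoriteCompanies)):
--             if i == j:
--                 continue
--             flag = False
--             if len(favoriteCompanies[i]) > len(favoriteCompanies[j]):
--                 flag = True
--             else:
--                 for k in range(len(favoriteCompanies[i])):
--                     if favoriteCompanies[i][k] in favoriteCompanies[j]:
--                         continue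
--                     else:
--                         flag = True
--                         break
--             ff &= flag
--         if ff:
--             res.append(i)
--     return res
-- ===== SOURCE B (Python) =====
-- def peopleIndexes(favoriteCompanies):
--     n = len(favoriteCompanies)
--     posting = {}
--     for i, comps in enumerate(favoriteCompanies):
--         for c in comps:
--             posting.setdefault(c, set()).add(i)
--     res = []
--     for i, comps in enumerate(favoriteCompanies):
--         supers = set(range(n))
--         for c in comps:
--             supers &= posting[c]
--         if supers == {i}:
--             res.append(i)
--     return res
-- ===== Notes on version B (the rewrite author's own statement) =====
-- stated objective: faster
-- what changed: Replaces A's pairwise nested subset scan (for every pair i,j test every company of list i against list j) by an inverted index from company to the set of list indices containing it; index i is kept iff intersecting the posting sets of its companies yields exactly {i}.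
-- outside the precondition, e.g. on peopleIndexes([['a', 'a'], ['a']]): A returns [0], B returns []
import Mathlib
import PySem

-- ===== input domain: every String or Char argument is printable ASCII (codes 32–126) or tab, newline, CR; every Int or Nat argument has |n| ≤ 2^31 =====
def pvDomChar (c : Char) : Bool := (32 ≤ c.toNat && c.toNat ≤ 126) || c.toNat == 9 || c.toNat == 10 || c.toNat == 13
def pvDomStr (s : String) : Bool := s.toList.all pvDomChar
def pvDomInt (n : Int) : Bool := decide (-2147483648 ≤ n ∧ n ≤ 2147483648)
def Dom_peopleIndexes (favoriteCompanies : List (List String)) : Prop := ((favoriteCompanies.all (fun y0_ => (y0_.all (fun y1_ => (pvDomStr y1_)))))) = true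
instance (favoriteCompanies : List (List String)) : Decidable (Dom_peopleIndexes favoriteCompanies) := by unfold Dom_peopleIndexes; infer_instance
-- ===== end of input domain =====

-- B replaces A's cubic pairwise subset scan with an inverted index (company -> set of list
-- indices); index i is kept iff the intersection of its companies' posting sets is exactly {i}.

-- ===== PORT A =====
-- A's k-loop: 'for k in range(len(li)): if li[k] in lj: continue else: flag = True; break'
def pvAInner (li lj : List String) : Bool :=
  match li with
  | [] => false
  | c :: rest => if lj.contains c then pvAInner rest lj else true

def peopleIndexes (favoriteCompanies : List (List String)) : List Int :=
  let fc := favoriteCompanies.map (fun x => PySem.List.sorted x (fun s => s))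
  (PySem.List.pyRange 0 (PySem.List.len fc) 1).foldl (fun res i =>
    let ff := (PySem.List.pyRange 0 (PySem.List.len fc) 1).foldl (fun ff j =>
      if i == j then ff
      else
        let flag :=
          if (PySem.List.pyGetD fc i []).length > (PySem.List.pyGetD fc j []).length then true
          else pvAInner (PySem.List.pyGetD fc i []) (PySem.List.pyGetD fc j [])
        ff && flag) true
    if ff then res ++ [i] else res) []

-- ===== PORT B =====
def peopleIndexes_alt (favoriteCompanies : List (List String)) : List Int :=
  let n : Int := favoriteCompanies.length
  let posting : PySem.Dict String (PySem.Set Int) :=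
    (PySem.List.enumerate favoriteCompanies).foldl
      (fun d p => p.2.foldl
        (fun d c => d.insert c (PySem.Set.add (d.getD c PySem.Set.empty) p.1)) d)
      PySem.Dict.empty
  (PySem.List.enumerate favoriteCompanies).foldl
    (fun res p =>
      let supers := p.2.foldl (fun s c => PySem.Set.inter s (posting.getD c PySem.Set.empty))
        (PySem.Set.ofList (PySem.List.pyRange 0 n 1))
      if PySem.Set.equal supers (PySem.Set.ofList [p.1]) then res ++ [p.1] else res) []

-- ===== PRECONDITION & SPEC =====
-- Pre_ excludes inputs where one favourites list contains (as a set of companies) another,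
-- strictly SHORTER list — possible only with duplicate entries inside a list, which the problem
-- statement rules out; on that corner A's multiset reading (compare raw lengths) and B's set
-- reading are both defensible and neither value is specified.
def Pre_peopleIndexes (favoriteCompanies : List (List String)) : Prop :=
  ∀ a : Nat, a < favoriteCompanies.length → ∀ b : Nat, b < favoriteCompanies.length →
    (∀ c ∈ favoriteCompanies.getD a [], c ∈ favoriteCompanies.getD b []) →
    (favoriteCompanies.getD a []).length ≤ (favoriteCompanies.getD b []).length
instance (favoriteCompanies : List (List String)) : Decidable (Pre_peopleIndexes favoriteCompanies) := by unfold Pre_peopleIndexes; infer_instance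
def pvWitness_peopleIndexes : List (List String) := [["a", "b"], ["a"]]

def Spec_peopleIndexes (favoriteCompanies : List (List String)) (out : List Int) : Prop := out = peopleIndexes_alt favoriteCompanies
instance (favoriteCompanies : List (List String)) (out : List Int) : Decidable (Spec_peopleIndexes favoriteCompanies out) := by unfold Spec_peopleIndexes; infer_instance

-- ===== CLAIM (what is proved, stated in full; the proofs are below) =====
def Claim_equal_peopleIndexes : Prop := ∀ (favoriteCompanies : List (List String)), Dom_peopleIndexes favoriteCompanies → Pre_peopleIndexes favoriteCompanies → Spec_peopleIndexes favoriteCompanies (peopleIndexes favoriteCompanies)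

-- ===== LEMMAS AND PROOFS =====

-- the common characterisation both ports are reduced to: keep index i iff no other index j
-- carries a superset of row i's companies
def pvSubB (a b : List String) : Bool := a.all (fun c => b.contains c)

def pvKeep (fc : List (List String)) (i : Int) : Bool :=
  (PySem.List.pyRange 0 (fc.length : Int) 1).all
    (fun j => j == i || !(pvSubB (PySem.List.pyGetD fc i []) (PySem.List.pyGetD fc j [])))

theorem pvSubB_iff (a b : List String) : pvSubB a b = true ↔ ∀ c ∈ a, c ∈ b := by
  simp [pvSubB]

theorem pvSubB_sorted (a b : List String) :
    pvSubB (PySem.List.sorted a (fun s => s)) (PySem.List.sorted b (fun s => s)) = pvSubB a b := by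
  rw [Bool.eq_iff_iff]
  simp [pvSubB, PySem.List.mem_sorted]

theorem pvAInner_eq (li lj : List String) : pvAInner li lj = !(pvSubB li lj) := by
  induction li with
  | nil => simp [pvAInner, pvSubB]
  | cons c rest ih => by_cases h : lj.contains c <;> simp [pvAInner, pvSubB, ih]

theorem pvAllCongrMem {l : List Int} {p q : Int → Bool} (h : ∀ x ∈ l, p x = q x) :
    l.all p = l.all q := by
  induction l with
  | nil => rfl
  | cons a t ih =>
    simp [List.all_cons, h a (List.mem_cons_self), ih (fun x hx => h x (List.mem_cons_of_mem a hx))]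

theorem pvFoldl_and (g : Int → Bool) (l : List Int) (b : Bool) :
    l.foldl (fun acc j => acc && g j) b = (b && l.all g) := by
  induction l generalizing b with
  | nil => simp
  | cons x xs ih => simp [List.foldl_cons, ih, Bool.and_assoc]

theorem pvFoldlAppend (p : Int → Bool) (l : List Int) :
    l.foldl (fun res i => if p i then res ++ [i] else res) [] = l.filter p := by
  simpa using PySem.List.foldl_append_if p (fun x => x) l []

def pvAflag (fc' : List (List String)) (i j : Int) : Bool :=
  if (PySem.List.pyGetD fc' i []).length > (PySem.List.pyGetD fc' j []).length then true
  else pvAInner (PySem.List.pyGetD fc' i []) (PySem.List.pyGetD fc' j [])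

theorem pvA_eq_filter (fc : List (List String)) (hpre : Pre_peopleIndexes fc) :
    peopleIndexes fc = (PySem.List.pyRange 0 (fc.length : Int) 1).filter (pvKeep fc) := by
  have step1 : peopleIndexes fc =
      (PySem.List.pyRange 0 (fc.length : Int) 1).filter (fun i =>
        (PySem.List.pyRange 0 (fc.length : Int) 1).foldl (fun ff j =>
          if i == j then ff
          else ff && pvAflag (fc.map (fun x => PySem.List.sorted x (fun s => s))) i j) true) := by
    unfold peopleIndexes
    simp only [PySem.List.len_eq, List.length_map]
    exact pvFoldlAppend _ _
  rw [step1]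
  apply List.filter_congr
  intro i hi
  rw [PySem.List.mem_pyRange_one] at hi
  have hget : ∀ (k : Int), PySem.List.pyGetD (fc.map (fun x => PySem.List.sorted x (fun s => s))) k []
      = PySem.List.sorted (PySem.List.pyGetD fc k []) (fun s => s) := by
    intro k
    simpa using PySem.List.pyGetD_map (fun x => PySem.List.sorted x (fun s => s)) fc k []
  have hbody : (fun (ff : Bool) (j : Int) =>
        if i == j then ff
        else ff && pvAflag (fc.map (fun x => PySem.List.sorted x (fun s => s))) i j)
      = (fun ff j => ff && (if i == j then true else pvAflag (fc.map (fun x => PySem.List.sorted x (fun s => s))) i j)) := by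
    funext ff j
    by_cases h : i == j <;> simp [h]
  rw [hbody, pvFoldl_and, Bool.true_and]
  unfold pvKeep
  apply pvAllCongrMem
  intro j hj
  rw [PySem.List.mem_pyRange_one] at hj
  obtain ⟨hj0, hjn⟩ := hj
  by_cases hij : i = j
  · simp [hij]
  · have hne : (i == j) = false := by simp [hij]
    have hne' : (j == i) = false := by simp [Ne.symm hij]
    rw [hne', Bool.false_or]
    simp only [hne, Bool.false_eq_true, if_false]
    unfold pvAflag
    rw [hget i, hget j, pvAInner_eq, pvSubB_sorted, PySem.List.length_sorted, PySem.List.length_sorted]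
    by_cases hsub : pvSubB (PySem.List.pyGetD fc i []) (PySem.List.pyGetD fc j []) = true
    · have e1 : PySem.List.pyGetD fc i [] = fc.getD i.toNat [] := by
        rw [PySem.List.pyGetD_eq_getElem fc [] hi.1 (by simpa using hi.2)]
        exact (List.getD_eq_getElem _ _ (by omega)).symm
      have e2 : PySem.List.pyGetD fc j [] = fc.getD j.toNat [] := by
        rw [PySem.List.pyGetD_eq_getElem fc [] hj0 (by simpa using hjn)]
        exact (List.getD_eq_getElem _ _ (by omega)).symm
      have hle := hpre i.toNat (by omega) j.toNat (by omega)
        (by rw [← e1, ← e2]; exact (pvSubB_iff _ _).mp hsub)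
      rw [← e1, ← e2] at hle
      have hnlt : ¬ ((PySem.List.pyGetD fc i []).length > (PySem.List.pyGetD fc j []).length) := by omega
      simp [hnlt]
    · by_cases hlt : (PySem.List.pyGetD fc i []).length > (PySem.List.pyGetD fc j []).length <;>
        simp [hlt, hsub]

theorem pvPostInner (comps : List String) (i : Int) (d : PySem.Dict String (PySem.Set Int))
    (c : String) (j : Int) :
    (j ∈ (comps.foldl (fun d c => d.insert c (PySem.Set.add (d.getD c PySem.Set.empty) i)) d).getD c PySem.Set.empty)
      ↔ j ∈ d.getD c PySem.Set.empty ∨ (c ∈ comps ∧ j = i) := by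
  induction comps generalizing d with
  | nil => simp
  | cons a rest ih =>
    rw [List.foldl_cons, ih]
    rw [PySem.Dict.getD_insert]
    by_cases hca : c = a
    · subst hca
      simp [PySem.Set.mem_add]
      tauto
    · rw [if_neg hca]
      simp only [List.mem_cons]
      constructor
      · tauto
      · rintro (h | ⟨(rfl | hm), rfl⟩) <;> tauto

theorem pvPost (l : List (Int × List String)) (d : PySem.Dict String (PySem.Set Int))
    (c : String) (j : Int) :
    (j ∈ (l.foldl (fun d p => p.2.foldl
        (fun d c => d.insert c (PySem.Set.add (d.getD c PySem.Set.empty) p.1)) d) d).getD c PySem.Set.empty)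
      ↔ j ∈ d.getD c PySem.Set.empty ∨ ∃ p ∈ l, c ∈ p.2 ∧ j = p.1 := by
  induction l generalizing d with
  | nil => simp
  | cons q rest ih =>
    rw [List.foldl_cons, ih, pvPostInner]
    simp only [List.mem_cons, exists_eq_or_imp]
    tauto

theorem pvPosting (fc : List (List String)) (c : String) (j : Int) :
    (j ∈ ((PySem.List.enumerate fc).foldl
      (fun d p => p.2.foldl
        (fun d c => d.insert c (PySem.Set.add (d.getD c PySem.Set.empty) p.1)) d)
      PySem.Dict.empty).getD c PySem.Set.empty)
      ↔ 0 ≤ j ∧ j < (fc.length : Int) ∧ c ∈ PySem.List.pyGetD fc j [] := by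
  rw [pvPost]
  simp only [PySem.Dict.getD_empty]
  constructor
  · rintro (h | ⟨p, hp, hc, hj⟩)
    · simp [PySem.Set.empty] at h
    · rw [PySem.List.mem_enumerate_iff] at hp
      obtain ⟨k, hk, rfl⟩ := hp
      simp only at hc hj
      subst hj
      refine ⟨by omega, by omega, ?_⟩
      rw [show ((0:Int) + (k:Int)) = (k:Int) by omega, PySem.List.pyGetD_natCast,
        List.getD_eq_getElem _ _ hk]
      simpa using hc
  · rintro ⟨h0, hn, hc⟩
    right
    refine ⟨((j : Int), fc[j.toNat]'(by omega)), ?_, ?_, ?_⟩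
    · rw [PySem.List.mem_enumerate_iff]
      exact ⟨j.toNat, by omega, by simp; omega⟩
    · rw [PySem.List.pyGetD_eq_getElem _ _ h0 (by simpa using hn)] at hc
      simpa using hc
    · rfl

theorem pvSupers (comps : List String) (posting : PySem.Dict String (PySem.Set Int))
    (s0 : PySem.Set Int) (j : Int) :
    (j ∈ comps.foldl (fun s c => PySem.Set.inter s (posting.getD c PySem.Set.empty)) s0)
      ↔ j ∈ s0 ∧ ∀ c ∈ comps, j ∈ posting.getD c PySem.Set.empty := by
  induction comps generalizing s0 with
  | nil => simp
  | cons a rest ih =>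
    rw [List.foldl_cons, ih]
    simp only [PySem.Set.mem_inter, List.mem_cons]
    constructor
    · rintro ⟨⟨h1, h2⟩, h3⟩
      refine ⟨h1, ?_⟩
      rintro c (rfl | hc)
      · exact h2
      · exact h3 c hc
    · rintro ⟨h1, h2⟩
      exact ⟨⟨h1, h2 a (Or.inl rfl)⟩, fun c hc => h2 c (Or.inr hc)⟩

theorem pvFoldlAppendP (p : Int × List String → Bool) (l : List (Int × List String)) :
    l.foldl (fun res q => if p q then res ++ [q.1] else res) ([] : List Int)
      = (l.filter p).map (·.1) := by
  simpa using PySem.List.foldl_append_if p (·.1) l []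

theorem pvB_eq_filter (fc : List (List String)) :
    peopleIndexes_alt fc = (PySem.List.pyRange 0 (fc.length : Int) 1).filter (pvKeep fc) := by
  unfold peopleIndexes_alt
  rw [pvFoldlAppendP]
  rw [PySem.List.enumerate_eq_map_pyRange fc []]
  rw [List.filter_map, List.map_map]
  simp only [PySem.List.len_eq]
  rw [show ((·.1 : Int × List String → Int) ∘ fun j => (j, PySem.List.pyGetD fc j [])) = id from rfl,
    List.map_id]
  apply List.filter_congr
  intro i hi
  rw [PySem.List.mem_pyRange_one] at hi
  simp only [Function.comp_apply]
  have henum : List.map (fun j => ((j : Int), PySem.List.pyGetD fc j []))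
      (PySem.List.pyRange 0 (fc.length : Int) 1) = PySem.List.enumerate fc := by
    simpa using (PySem.List.enumerate_eq_map_pyRange fc []).symm
  rw [henum]
  rw [Bool.eq_iff_iff, PySem.Set.equal_iff, pvKeep]
  have hofl : PySem.Set.ofList (PySem.List.pyRange 0 (fc.length : Int) 1)
      = PySem.List.pyRange 0 (fc.length : Int) 1 :=
    PySem.Set.ofList_eq_self_of_nodup _ (PySem.List.nodup_pyRange_one 0 _)
  have hofl1 : PySem.Set.ofList [i] = [i] :=
    PySem.Set.ofList_eq_self_of_nodup _ (by simp)
  rw [hofl, hofl1]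
  constructor
  · intro h
    rw [List.all_eq_true]
    intro j hj
    rw [PySem.List.mem_pyRange_one] at hj
    by_cases hsub : pvSubB (PySem.List.pyGetD fc i []) (PySem.List.pyGetD fc j []) = true
    · have hjmem : j ∈ ((i, PySem.List.pyGetD fc i []).2).foldl
          (fun s c => PySem.Set.inter s ((((PySem.List.enumerate fc).foldl
            (fun d p => p.2.foldl (fun d c => d.insert c (PySem.Set.add (d.getD c PySem.Set.empty) p.1)) d)
            PySem.Dict.empty)).getD c PySem.Set.empty))
          (PySem.List.pyRange 0 (fc.length : Int) 1) := by
        rw [pvSupers]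
        refine ⟨by rw [PySem.List.mem_pyRange_one]; omega, ?_⟩
        intro c hc
        rw [pvPosting]
        exact ⟨by omega, by omega, (pvSubB_iff _ _).mp hsub c hc⟩
      have := (h j).mp hjmem
      simp at this
      simp [this]
    · simp [hsub]
  · intro h x
    rw [pvSupers, List.mem_singleton]
    constructor
    · rintro ⟨hx, hall⟩
      rw [PySem.List.mem_pyRange_one] at hx
      rw [List.all_eq_true] at h
      have hx2 : pvSubB (PySem.List.pyGetD fc i []) (PySem.List.pyGetD fc x []) = true := by
        rw [pvSubB_iff]
        intro c hc
        have := hall c hc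
        rw [pvPosting] at this
        exact this.2.2
      have := h x (by rw [PySem.List.mem_pyRange_one]; omega)
      simp [hx2] at this
      omega
    · rintro rfl
      refine ⟨by rw [PySem.List.mem_pyRange_one]; omega, ?_⟩
      intro c hc
      rw [pvPosting]
      exact ⟨by omega, by omega, hc⟩

-- ===== VERDICT (by name: the statement is the Claim_ definition above) =====
theorem peopleIndexes_spec : Claim_equal_peopleIndexes := by
  intro fc _ hpre
  unfold Spec_peopleIndexes
  rw [pvA_eq_filter fc hpre, pvB_eq_filter fc]
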